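-- pv_equiv track=rewrite | github.com/piMateusz/BPMN | bpmn_app/bpmn_utils/alpha_algorithm.py | get_parrallel
-- ===== SOURCE A (Python) =====
-- def get_parrallel(direct_succesion):
--     parrarel_events = set()
--     for event, successors in direct_succesion.items():
--         for succesor in successors:
--             if succesor in direct_succesion:
--                 if event in direct_succesion[succesor]:
--                     parrarel_events.add(tuple(sorted([event, succesor])))
--     return parrarel_events
-- ===== SOURCE B (Python) =====
-- def get_parrallel(direct_succesion):
--     edges = {(e, s) for e, succs in direct_succesion.items() for s in succs}
--     reversed_edges = {(s, e) for (e, s) in edges}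
--     return {tuple(sorted(pair)) for pair in edges & reversed_edges}
-- ===== Notes on version B (the rewrite author's own statement) =====
-- stated objective: simpler
-- what changed: Builds the directed-edge set once and intersects it with its own reverse (set comprehensions), instead of A's nested loops with membership and dict-lookup guards per successor.
import Mathlib
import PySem

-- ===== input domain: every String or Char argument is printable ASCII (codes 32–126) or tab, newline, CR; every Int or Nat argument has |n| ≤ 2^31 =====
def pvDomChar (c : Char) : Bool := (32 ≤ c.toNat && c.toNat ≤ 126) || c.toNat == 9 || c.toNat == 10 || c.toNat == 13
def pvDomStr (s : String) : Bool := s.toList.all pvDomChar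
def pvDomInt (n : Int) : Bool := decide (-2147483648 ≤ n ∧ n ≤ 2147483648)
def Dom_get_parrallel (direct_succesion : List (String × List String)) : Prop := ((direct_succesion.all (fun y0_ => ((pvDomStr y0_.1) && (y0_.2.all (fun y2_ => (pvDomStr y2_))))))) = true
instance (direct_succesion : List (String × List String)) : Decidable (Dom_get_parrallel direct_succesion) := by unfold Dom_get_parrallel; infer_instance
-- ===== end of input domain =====

-- B replaces A's nested membership/dict-lookup guards by building the directed-edge set once
-- and intersecting it with its own reverse (objective: simpler).

-- ===== PORT A =====
-- 'tuple(sorted([event, succesor]))': sorted of a two-element list is ported by hand as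
-- 'if succesor < event then (succesor, event) else (event, succesor)' (exact: stable 2-element sort).
-- 'direct_succesion[succesor]' is only evaluated under the 'succesor in direct_succesion' guard,
-- so 'getD … []' is exact there.
def get_parrallel (direct_succesion : List (String × List String)) : List (String × String) :=
  direct_succesion.foldl
    (fun parrarel_events ev =>
      ev.2.foldl
        (fun parrarel_events succesor =>
          if (PySem.Dict.mk direct_succesion).contains succesor then
            if ev.1 ∈ (PySem.Dict.mk direct_succesion).getD succesor [] then
              PySem.Set.add parrarel_events
                (if succesor < ev.1 then (succesor, ev.1) else (ev.1, succesor))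
            else parrarel_events
          else parrarel_events)
        parrarel_events)
    []

-- ===== PORT B =====
-- The final comprehension iterates a Python set whose own result is again a set, so the result
-- does not depend on the iteration order; it is ported in the Set's first-insertion order.
-- 'tuple(sorted(pair))' is the hand-ported stable 2-element sort as in port A.
def get_parrallel_alt (direct_succesion : List (String × List String)) : List (String × String) :=
  let edges : PySem.Set (String × String) :=
    PySem.Set.ofList (direct_succesion.flatMap (fun es => es.2.map (fun s => (es.1, s))))
  let reversed_edges : PySem.Set (String × String) :=
    PySem.Set.ofList (edges.map (fun p => (p.2, p.1)))
  PySem.Set.ofList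
    ((PySem.Set.inter edges reversed_edges).map
      (fun p => if p.2 < p.1 then (p.2, p.1) else (p.1, p.2)))

-- ===== PRECONDITION & SPEC =====
-- The parameter is a Python dict: an association list with duplicate keys represents no dict
-- (Python merges duplicate keys at construction), so such lists are excluded.
def Pre_get_parrallel (direct_succesion : List (String × List String)) : Prop :=
  (direct_succesion.map Prod.fst).Nodup

instance (direct_succesion : List (String × List String)) : Decidable (Pre_get_parrallel direct_succesion) := by unfold Pre_get_parrallel; infer_instance

def pvWitness_get_parrallel : (List (String × List String)) :=
  [("a", ["b", "c"]), ("b", ["a"]), ("c", ["d"])]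

def Spec_get_parrallel (direct_succesion : List (String × List String)) (out : List (String × String)) : Prop := out = get_parrallel_alt direct_succesion
instance (direct_succesion : List (String × List String)) (out : List (String × String)) : Decidable (Spec_get_parrallel direct_succesion out) := by unfold Spec_get_parrallel; infer_instance

-- ===== CLAIM (what is proved, stated in full; the proofs are below) =====
def Claim_equal_get_parrallel : Prop := ∀ (direct_succesion : List (String × List String)), Dom_get_parrallel direct_succesion → Pre_get_parrallel direct_succesion → Spec_get_parrallel direct_succesion (get_parrallel direct_succesion)

-- ===== LEMMAS AND PROOFS =====

-- the flat directed-edge list (with possible duplicates), in scan order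
def pvL (d : List (String × List String)) : List (String × String) :=
  d.flatMap (fun es => es.2.map (fun s => (es.1, s)))

def pvG (p : String × String) : String × String :=
  if p.2 < p.1 then (p.2, p.1) else (p.1, p.2)

-- A's nested loop is a single fold over the flat edge list
theorem pv_foldl_flat (d0 d : List (String × List String))
    (acc : PySem.Set (String × String)) :
    d.foldl
      (fun parrarel_events ev =>
        ev.2.foldl
          (fun parrarel_events succesor =>
            if (PySem.Dict.mk d0).contains succesor then
              if ev.1 ∈ (PySem.Dict.mk d0).getD succesor [] then
                PySem.Set.add parrarel_events
                  (if succesor < ev.1 then (succesor, ev.1) else (ev.1, succesor))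
              else parrarel_events
            else parrarel_events)
          parrarel_events)
      acc
      = (pvL d).foldl
          (fun parrarel_events p =>
            if (PySem.Dict.mk d0).contains p.2 then
              if p.1 ∈ (PySem.Dict.mk d0).getD p.2 [] then
                PySem.Set.add parrarel_events
                  (if p.2 < p.1 then (p.2, p.1) else (p.1, p.2))
              else parrarel_events
            else parrarel_events)
          acc := by
  induction d generalizing acc with
  | nil => rfl
  | cons e t ih =>
    simp only [pvL, List.flatMap_cons, List.foldl_append, List.foldl_cons, List.foldl_map]
    exact ih _

theorem pv_fst_mem_of_mem_pvL {d : List (String × List String)} {s e : String}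
    (h : (s, e) ∈ pvL d) : s ∈ d.map Prod.fst := by
  simp only [pvL, List.mem_flatMap, List.mem_map] at h
  obtain ⟨es, hes, t, _, heq⟩ := h
  cases heq
  exact List.mem_map.mpr ⟨es, hes, rfl⟩

-- under unique keys, A's two guards test exactly reverse-edge membership
theorem pv_guard_iff (d : List (String × List String))
    (hnd : (d.map Prod.fst).Nodup) (e s : String) :
    ((PySem.Dict.mk d).contains s ∧ e ∈ (PySem.Dict.mk d).getD s []) ↔ (s, e) ∈ pvL d := by
  induction d with
  | nil => simp [PySem.Dict.contains, pvL]
  | cons kv t ih =>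
    obtain ⟨k, vs⟩ := kv
    have hnd' : (t.map Prod.fst).Nodup := (List.nodup_cons.mp hnd).2
    have hk : k ∉ t.map Prod.fst := (List.nodup_cons.mp hnd).1
    have hm : ((s, e) ∈ pvL ((k, vs) :: t)) ↔ ((k = s ∧ e ∈ vs) ∨ (s, e) ∈ pvL t) := by
      simp only [pvL, List.flatMap_cons, List.mem_append, List.mem_map]
      constructor
      · rintro (⟨x, hx, hxe⟩ | h)
        · cases hxe; exact Or.inl ⟨rfl, hx⟩
        · exact Or.inr h
      · rintro (⟨rfl, he⟩ | h)
        · exact Or.inl ⟨e, he, rfl⟩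
        · exact Or.inr h
    by_cases hks : k = s
    · subst hks
      have hnot : (k, e) ∉ pvL t := fun hmem => hk (pv_fst_mem_of_mem_pvL hmem)
      have hc : (PySem.Dict.mk ((k, vs) :: t)).contains k = true := by
        simp [PySem.Dict.contains]
      have hg : (PySem.Dict.mk ((k, vs) :: t)).getD k [] = vs := by
        simp [PySem.Dict.getD, PySem.Dict.get?]
      rw [hm, hc, hg]
      simp [hnot]
    · have hc : (PySem.Dict.mk ((k, vs) :: t)).contains s = (PySem.Dict.mk t).contains s := by
        simp [PySem.Dict.contains, hks]
      have hg : (PySem.Dict.mk ((k, vs) :: t)).getD s [] = (PySem.Dict.mk t).getD s [] := by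
        simp [PySem.Dict.getD, PySem.Dict.get?, hks]
      rw [hm, hc, hg, ih hnd']
      simp [hks]

-- A computes set(map pvG (filter q (pvL d))) for the reverse-edge test q
theorem pv_A_eq (d : List (String × List String)) (hnd : (d.map Prod.fst).Nodup) :
    get_parrallel d
      = PySem.Set.ofList
          (((pvL d).filter (fun p => decide ((p.2, p.1) ∈ pvL d))).map pvG) := by
  unfold get_parrallel
  rw [pv_foldl_flat d d]
  have hstep : ∀ (acc : PySem.Set (String × String)) (p : String × String),
      (if (PySem.Dict.mk d).contains p.2 then
        if p.1 ∈ (PySem.Dict.mk d).getD p.2 [] then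
          PySem.Set.add acc (if p.2 < p.1 then (p.2, p.1) else (p.1, p.2))
        else acc
      else acc)
        = (if decide ((p.2, p.1) ∈ pvL d) then PySem.Set.add acc (pvG p) else acc) := by
    intro acc p
    have := pv_guard_iff d hnd p.1 p.2
    by_cases hmem : (p.2, p.1) ∈ pvL d
    · obtain ⟨hc, hg⟩ := this.mpr hmem
      simp [hc, hg, hmem, pvG]
    · simp only [hmem, decide_false, Bool.false_eq_true, if_false]
      by_cases hc : (PySem.Dict.mk d).contains p.2
      · have hg : p.1 ∉ (PySem.Dict.mk d).getD p.2 [] := fun hg => hmem (this.mp ⟨hc, hg⟩)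
        simp [hc, hg]
      · simp [hc]
  calc (pvL d).foldl (fun par p =>
          if (PySem.Dict.mk d).contains p.2 then
            if p.1 ∈ (PySem.Dict.mk d).getD p.2 [] then
              PySem.Set.add par (if p.2 < p.1 then (p.2, p.1) else (p.1, p.2))
            else par
          else par) []
      = (pvL d).foldl (fun par p =>
          if decide ((p.2, p.1) ∈ pvL d) then PySem.Set.add par (pvG p) else par) [] := by
        exact PySem.List.foldl_congr_mem _ _ _ _ (fun acc p _ => hstep acc p)
    _ = ((pvL d).filter (fun p => decide ((p.2, p.1) ∈ pvL d))).foldl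
          (fun par p => PySem.Set.add par (pvG p)) [] :=
        PySem.List.foldl_if_eq_foldl_filter _ _ _ _
    _ = PySem.Set.update []
          (((pvL d).filter (fun p => decide ((p.2, p.1) ∈ pvL d))).map pvG) :=
        (PySem.Set.update_map_eq_foldl_add _ _ _).symm
    _ = _ := PySem.Set.update_empty _

-- filter commutes with Python-set dedup (first occurrences)
theorem pv_filter_ofList {α : Type} [BEq α] [LawfulBEq α] (q : α → Bool) (xs : List α) :
    (PySem.Set.ofList xs).filter q = PySem.Set.ofList (xs.filter q) := by
  induction xs using List.reverseRecOn with
  | nil => rfl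
  | append_singleton ys y ih =>
    rw [PySem.Set.ofList_append_singleton, List.filter_append]
    by_cases hy : y ∈ ys
    · rw [PySem.Set.add_of_mem ((PySem.Set.mem_ofList _ _).mpr hy), ih]
      by_cases hq : q y = true
      · have h1 : List.filter q [y] = [y] := by simp [hq]
        rw [h1, PySem.Set.ofList_append_singleton,
          PySem.Set.add_of_mem ((PySem.Set.mem_ofList _ _).mpr (List.mem_filter.mpr ⟨hy, hq⟩))]
      · have h1 : List.filter q [y] = [] := by simp [hq]
        rw [h1, List.append_nil]
    · rw [PySem.Set.add_of_not_mem (fun h => hy ((PySem.Set.mem_ofList _ _).mp h)),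
        List.filter_append, ih]
      by_cases hq : q y = true
      · have h1 : List.filter q [y] = [y] := by simp [hq]
        rw [h1, PySem.Set.ofList_append_singleton,
          PySem.Set.add_of_not_mem
            (fun h => hy (List.mem_filter.mp ((PySem.Set.mem_ofList _ _).mp h)).1)]
      · have h1 : List.filter q [y] = [] := by simp [hq]
        rw [h1, List.append_nil, List.append_nil]

-- dedup before a mapped dedup is redundant
theorem pv_ofList_map_ofList {α β : Type} [BEq α] [LawfulBEq α] [BEq β] [LawfulBEq β]
    (g : α → β) (xs : List α) :
    PySem.Set.ofList ((PySem.Set.ofList xs).map g) = PySem.Set.ofList (xs.map g) := by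
  induction xs using List.reverseRecOn with
  | nil => rfl
  | append_singleton ys y ih =>
    rw [List.map_append]
    simp only [List.map_cons, List.map_nil]
    rw [PySem.Set.ofList_append_singleton, PySem.Set.ofList_append_singleton]
    by_cases hy : y ∈ ys
    · rw [PySem.Set.add_of_mem ((PySem.Set.mem_ofList _ _).mpr hy), ih,
        PySem.Set.add_of_mem
          ((PySem.Set.mem_ofList _ _).mpr (List.mem_map.mpr ⟨y, hy, rfl⟩))]
    · rw [PySem.Set.add_of_not_mem (fun h => hy ((PySem.Set.mem_ofList _ _).mp h)),
        List.map_append]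
      simp only [List.map_cons, List.map_nil]
      rw [PySem.Set.ofList_append_singleton, ih]

-- B's reverse-set membership test equals the reverse-edge test on the raw list
theorem pv_B_eq (d : List (String × List String)) :
    get_parrallel_alt d
      = PySem.Set.ofList
          (((PySem.Set.ofList (pvL d)).filter
              (fun p => decide ((p.2, p.1) ∈ pvL d))).map pvG) := by
  unfold get_parrallel_alt
  simp only [pvL, PySem.Set.inter]
  congr 1
  congr 1
  apply List.filter_congr
  intro p _
  simp only [PySem.Set.contains, List.contains_eq_mem, PySem.Set.mem_ofList, List.mem_map,
    decide_eq_decide]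
  constructor
  · rintro ⟨q, hq, hqe⟩
    have : q = (p.2, p.1) := by
      cases q; cases p; cases hqe; rfl
    rwa [this] at hq
  · intro h
    exact ⟨(p.2, p.1), h, rfl⟩

-- ===== VERDICT (by name: the statement is the Claim_ definition above) =====
theorem get_parrallel_spec : Claim_equal_get_parrallel := by
  intro d _ hpre
  unfold Spec_get_parrallel
  rw [pv_A_eq d hpre, pv_B_eq d, pv_filter_ofList, pv_ofList_map_ofList]
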